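-- pv_equiv track=rewrite | github.com/Jo-Heidrich/specific-heat-load-profiles | soft/experiment.py | window_in_test_splits
-- ===== SOURCE A (Python) =====
-- def window_in_test_splits(time_index: int, n_days: int, splits) -> list[int]:
--     win = set(range(time_index, time_index + n_days * 24))
--     hits = []
--     for si, (_tr, te) in enumerate(splits, 1):
--         te_set = set(map(int, te.tolist() if hasattr(te, "tolist") else te))
--         if win.issubset(te_set):
--             hits.append(si)
--     return hits
-- ===== SOURCE B (Python) =====
-- def window_in_test_splits(time_index: int, n_days: int, splits) -> list[int]:
--     lo = time_index
--     size = n_days * 24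
--     if size < 0:
--         size = 0
--     stamp = [0] * size
--     hits = []
--     si = 0
--     for _tr, te in splits:
--         si += 1
--         remaining = size
--         for v in (te.tolist() if hasattr(te, "tolist") else te):
--             idx = int(v) - lo
--             if 0 <= idx < size and stamp[idx] != si:
--                 stamp[idx] = si
--                 remaining -= 1
--         if remaining == 0:
--             hits.append(si)
--     return hits
-- ===== Notes on version B (the rewrite author's own statement) =====
-- stated objective: faster
-- what changed: Replaces the per-split hash set plus win.issubset test with a positional stamp array over the contiguous window, allocated once: each split's test indices stamp covered positions with the split number and decrement a remaining counter, and the split hits iff the counter reaches zero, so per-split work no longer depends on the window size.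
import Mathlib
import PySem

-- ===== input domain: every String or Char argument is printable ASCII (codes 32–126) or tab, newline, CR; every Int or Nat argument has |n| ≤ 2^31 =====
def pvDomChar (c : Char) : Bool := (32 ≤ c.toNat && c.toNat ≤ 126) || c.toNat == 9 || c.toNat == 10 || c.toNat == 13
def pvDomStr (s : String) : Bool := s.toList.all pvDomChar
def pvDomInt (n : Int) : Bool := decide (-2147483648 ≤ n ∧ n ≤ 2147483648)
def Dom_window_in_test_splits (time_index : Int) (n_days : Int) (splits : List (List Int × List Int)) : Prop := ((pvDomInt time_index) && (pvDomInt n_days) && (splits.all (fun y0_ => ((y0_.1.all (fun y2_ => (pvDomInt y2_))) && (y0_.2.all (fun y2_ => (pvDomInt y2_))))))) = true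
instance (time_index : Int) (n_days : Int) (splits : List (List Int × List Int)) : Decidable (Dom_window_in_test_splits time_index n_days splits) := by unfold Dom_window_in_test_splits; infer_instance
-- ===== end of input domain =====

-- B replaces A's per-split hash set + subset test by a positional stamp array over the
-- contiguous window, allocated once: each split's test indices stamp covered positions
-- with the split number and decrement a remaining counter; the split hits iff it is 0.

-- ===== PORT A =====
def window_in_test_splits (time_index : Int) (n_days : Int) (splits : List (List Int × List Int)) : List Int :=
  let win : PySem.Set Int :=
    PySem.Set.ofList (PySem.List.pyRange time_index (time_index + n_days * 24) 1)
  (PySem.List.enumerate splits 1).foldl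
    (fun hits p =>
      let te_set : PySem.Set Int := PySem.Set.ofList p.2.2
      if PySem.Set.issubset win te_set then hits ++ [p.1] else hits)
    []

-- ===== PORT B =====
-- one marking step: stamp[idx] reads in-range (0 ≤ idx < size = stamp length), so the
-- total pyGetD is exact for Python's stamp[idx]
def innerStep (lo size r : Int) (st : List Int × Int) (v : Int) : List Int × Int :=
  if 0 ≤ v - lo ∧ v - lo < size ∧ PySem.List.pyGetD st.1 (v - lo) 0 ≠ r then
    (st.1.set (v - lo).toNat r, st.2 - 1)
  else st

def window_in_test_splits_alt (time_index : Int) (n_days : Int) (splits : List (List Int × List Int)) : List Int :=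
  let lo := time_index
  let size0 := n_days * 24
  let size := if size0 < 0 then 0 else size0
  (splits.foldl
    (fun (st : Int × List Int × List Int) p =>
      let si := st.1 + 1
      let inner := p.2.foldl (innerStep lo size si) (st.2.1, size)
      (si, inner.1, if inner.2 = 0 then st.2.2 ++ [si] else st.2.2))
    (0, List.replicate size.toNat 0, [])).2.2

-- ===== PRECONDITION & SPEC =====
def Spec_window_in_test_splits (time_index : Int) (n_days : Int) (splits : List (List Int × List Int)) (out : List Int) : Prop := out = window_in_test_splits_alt time_index n_days splits
instance (time_index : Int) (n_days : Int) (splits : List (List Int × List Int)) (out : List Int) : Decidable (Spec_window_in_test_splits time_index n_days splits out) := by unfold Spec_window_in_test_splits; infer_instance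

-- ===== CLAIM (what is proved, stated in full; the proofs are below) =====
def Claim_equal_window_in_test_splits : Prop := ∀ (time_index : Int) (n_days : Int) (splits : List (List Int × List Int)), Dom_window_in_test_splits time_index n_days splits → Spec_window_in_test_splits time_index n_days splits (window_in_test_splits time_index n_days splits)

-- ===== LEMMAS AND PROOFS =====

theorem inner_length (lo size r : Int) (te : List Int) (s : List Int) (rem : Int) :
    (te.foldl (innerStep lo size r) (s, rem)).1.length = s.length := by
  induction te generalizing s rem with
  | nil => rfl
  | cons v te ih =>
    simp only [List.foldl_cons, innerStep]
    split_ifs with hg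
    · rw [ih]; simp
    · exact ih s rem

theorem inner_get (lo size r : Int) (te : List Int) (s : List Int) (rem : Int)
    (hlen : s.length = size.toNat) (j : Nat) :
    getElem? (te.foldl (innerStep lo size r) (s, rem)).1 j
      = if (lo + (j : Int)) ∈ te ∧ (j : Int) < size then some r else getElem? s j := by
  induction te generalizing s rem with
  | nil => simp
  | cons v te ih =>
    simp only [List.foldl_cons]
    by_cases hg : 0 ≤ v - lo ∧ v - lo < size ∧ PySem.List.pyGetD s (v - lo) 0 ≠ r
    · have hstep : innerStep lo size r (s, rem) v = (s.set (v - lo).toNat r, rem - 1) := by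
        simp only [innerStep]; rw [if_pos hg]
      rw [hstep, ih _ _ (by rw [List.length_set]; exact hlen)]
      by_cases hj : (j : Int) < size
      · by_cases hv : v = lo + (j : Int)
        · subst hv
          have hidx : (lo + (j : Int) - lo).toNat = j := by omega
          have hjlen : j < s.length := by omega
          rw [hidx]
          by_cases hte : (lo + (j : Int)) ∈ te
          · simp [hte, hj]
          · simp [hte, hj, hjlen]
        · have hne : (v - lo).toNat ≠ j := by omega
          have hvne : (lo + (j : Int)) ≠ v := fun hh => hv hh.symm
          have hmem : ((lo + (j : Int)) ∈ v :: te ∧ (j : Int) < size)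
              ↔ ((lo + (j : Int)) ∈ te ∧ (j : Int) < size) := by
            simp [List.mem_cons, hvne]
          rw [if_congr hmem rfl rfl]
          split_ifs with hc
          · rfl
          · rw [List.getElem?_set]; simp [hne]
      · rw [if_neg (by tauto), if_neg (by tauto)]
        have hne : (v - lo).toNat ≠ j := by omega
        rw [List.getElem?_set]; simp [hne]
    · have hstep : innerStep lo size r (s, rem) v = (s, rem) := by
        simp only [innerStep]; rw [if_neg hg]
      rw [hstep, ih s rem hlen]
      by_cases hv : v = lo + (j : Int)
      · by_cases hj : (j : Int) < size
        · -- the guard failed only because stamp[j] = r already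
          have hget : PySem.List.pyGetD s (v - lo) 0 = r := by
            by_contra hr
            exact hg ⟨by omega, by omega, hr⟩
          have hidx : (v - lo).toNat = j := by omega
          have hjlen : j < s.length := by omega
          rw [PySem.List.pyGetD_eq_getElem s 0 (by omega) (by omega)] at hget
          have hget' : getElem? s (v - lo).toNat = some r := by
            rw [List.getElem?_eq_getElem (by omega : (v - lo).toNat < s.length)]
            exact congrArg some hget
          rw [hidx] at hget'
          have hsome : getElem? s j = some r := hget'
          subst hv
          by_cases hte : (lo + (j : Int)) ∈ te
          · simp [hte, hj]
          · simp [hte, hj, hsome]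
        · rw [if_neg (by tauto), if_neg (by tauto)]
      · have hvne : (lo + (j : Int)) ≠ v := fun hh => hv hh.symm
        have hmem : ((lo + (j : Int)) ∈ v :: te ∧ (j : Int) < size)
            ↔ ((lo + (j : Int)) ∈ te ∧ (j : Int) < size) := by
          simp [List.mem_cons, hvne]
        rw [if_congr hmem rfl rfl]

-- counting over a range when two predicates differ at exactly one true→false position
theorem countP_range_succ_at (N j0 : Nat) (hj : j0 < N) (p q : Nat → Bool)
    (hpq : ∀ j, j ≠ j0 → p j = q j) (hp : p j0 = true) (hq : q j0 = false) :
    (List.range N).countP p = (List.range N).countP q + 1 := by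
  induction N with
  | zero => omega
  | succ N ihN =>
    rw [List.range_succ, List.countP_append, List.countP_append]
    by_cases hend : j0 = N
    · have hc : (List.range N).countP p = (List.range N).countP q := by
        apply List.countP_congr
        intro j hjm
        rw [hpq j (by have := List.mem_range.mp hjm; omega)]
      subst hend
      simp [hp, hq, hc]
    · have := ihN (by omega)
      have hpN : p N = q N := hpq N (by omega)
      simp [List.countP_cons, hpN]
      omega

theorem inner_count (lo size r : Int) (te : List Int) (s : List Int) (rem : Int)
    (hlen : s.length = size.toNat) :
    (te.foldl (innerStep lo size r) (s, rem)).2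
      = rem - ((List.range size.toNat).countP
          (fun (j : Nat) => decide ((lo + (j : Int)) ∈ te)
            && !decide (getElem? s j = some r))) := by
  induction te generalizing s rem with
  | nil => simp
  | cons v te ih =>
    simp only [List.foldl_cons]
    by_cases hg : 0 ≤ v - lo ∧ v - lo < size ∧ PySem.List.pyGetD s (v - lo) 0 ≠ r
    · have hstep : innerStep lo size r (s, rem) v = (s.set (v - lo).toNat r, rem - 1) := by
        simp only [innerStep]; rw [if_pos hg]
      rw [hstep, ih _ _ (by rw [List.length_set]; exact hlen)]
      have hidx : (v - lo).toNat < size.toNat := by omega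
      have hjlen : (v - lo).toNat < s.length := by omega
      have hcnt : (List.range size.toNat).countP
            (fun (j : Nat) => decide ((lo + (j : Int)) ∈ v :: te)
              && !decide (getElem? s j = some r))
          = (List.range size.toNat).countP
            (fun (j : Nat) => decide ((lo + (j : Int)) ∈ te)
              && !decide (getElem? (s.set (v - lo).toNat r) j = some r)) + 1 := by
        apply countP_range_succ_at size.toNat (v - lo).toNat hidx
        · intro j hne
          have hvne : lo + (j : Int) ≠ v := by intro hh; apply hne; omega
          rw [List.getElem?_set]
          simp [List.mem_cons, hvne, Ne.symm hne]
        · have hnr : ¬ (getElem? s (v - lo).toNat = some r) := by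
            intro hc
            apply hg.2.2
            rw [PySem.List.pyGetD_eq_getElem s 0 (by omega) (by omega)]
            rw [List.getElem?_eq_getElem hjlen] at hc
            exact Option.some.inj hc
          simp [hnr, List.mem_cons]
          exact Or.inl (by omega)
        · simp [hjlen]
      rw [hcnt]
      push_cast
      ring
    · have hstep : innerStep lo size r (s, rem) v = (s, rem) := by
        simp only [innerStep]; rw [if_neg hg]
      rw [hstep, ih s rem hlen]
      have hcnt : (List.range size.toNat).countP
            (fun (j : Nat) => decide ((lo + (j : Int)) ∈ v :: te)
              && !decide (getElem? s j = some r))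
          = (List.range size.toNat).countP
            (fun (j : Nat) => decide ((lo + (j : Int)) ∈ te)
              && !decide (getElem? s j = some r)) := by
        apply List.countP_congr
        intro j hjm
        have hjN : j < size.toNat := List.mem_range.mp hjm
        by_cases hv : lo + (j : Int) = v
        · -- v in window; the guard failed, so stamp[j] = r already
          have hg3 : PySem.List.pyGetD s (v - lo) 0 = r := by
            by_contra hr
            exact hg ⟨by omega, by omega, hr⟩
          have hidx : (v - lo).toNat = j := by omega
          have hjlen : j < s.length := by omega
          rw [PySem.List.pyGetD_eq_getElem s 0 (by omega) (by omega)] at hg3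
          have hg3' : getElem? s (v - lo).toNat = some r := by
            rw [List.getElem?_eq_getElem (by omega : (v - lo).toNat < s.length)]
            exact congrArg some hg3
          rw [hidx] at hg3'
          simp [hg3']
        · simp [List.mem_cons, hv]
      rw [hcnt]

-- one round: with a stamp array fresh for r, the counter reaches 0 iff the whole
-- window [lo, lo+size) lies in te
theorem round_zero_iff (lo size r : Int) (te : List Int) (s : List Int)
    (hsz : 0 ≤ size) (hlen : s.length = size.toNat)
    (hfresh : ∀ j : Nat, getElem? s j ≠ some r) :
    ((te.foldl (innerStep lo size r) (s, size)).2 = 0)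
      ↔ (∀ x : Int, lo ≤ x ∧ x < lo + size → x ∈ te) := by
  rw [inner_count lo size r te s size hlen]
  have hcnt : (List.range size.toNat).countP
        (fun (j : Nat) => decide ((lo + (j : Int)) ∈ te) && !decide (getElem? s j = some r))
      = (List.range size.toNat).countP (fun (j : Nat) => decide ((lo + (j : Int)) ∈ te)) := by
    apply List.countP_congr
    intro j _
    simp [hfresh j]
  rw [hcnt]
  have hle := List.countP_le_length
    (p := fun (j : Nat) => decide ((lo + (j : Int)) ∈ te)) (l := List.range size.toNat)
  rw [List.length_range] at hle
  constructor
  · intro h0 x hx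
    have hall : (List.range size.toNat).countP (fun (j : Nat) => decide ((lo + (j : Int)) ∈ te))
        = (List.range size.toNat).length := by
      rw [List.length_range]; omega
    rw [List.countP_eq_length] at hall
    have hj : (x - lo).toNat < size.toNat := by omega
    have := hall (x - lo).toNat (List.mem_range.mpr hj)
    simp only [decide_eq_true_eq] at this
    have hx' : lo + (((x - lo).toNat : Nat) : Int) = x := by omega
    rwa [hx'] at this
  · intro h
    have hall : (List.range size.toNat).countP (fun (j : Nat) => decide ((lo + (j : Int)) ∈ te))
        = (List.range size.toNat).length := by
      rw [List.countP_eq_length]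
      intro j hjm
      have hjN : j < size.toNat := List.mem_range.mp hjm
      simp only [decide_eq_true_eq]
      exact h (lo + (j : Int)) ⟨by omega, by omega⟩
    rw [List.length_range] at hall
    omega

-- the outer folds agree, carrying the stamp-array invariant (all entries ≤ round counter)
theorem outer_eq (lo size0 : Int) (splits : List (List Int × List Int)) (n : Int)
    (hits : List Int) (s : List Int)
    (hlen : s.length = (if size0 < 0 then 0 else size0).toNat)
    (hinv : ∀ (j : Nat) (w : Int), getElem? s j = some w → w ≤ n) :
    (PySem.List.enumerate splits (n + 1)).foldl
      (fun hits p =>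
        let te_set : PySem.Set Int := PySem.Set.ofList p.2.2
        if PySem.Set.issubset (PySem.Set.ofList (PySem.List.pyRange lo (lo + size0) 1)) te_set
        then hits ++ [p.1] else hits)
      hits
    = (splits.foldl
        (fun (st : Int × List Int × List Int) p =>
          let si := st.1 + 1
          let inner := p.2.foldl (innerStep lo (if size0 < 0 then 0 else size0) si) (st.2.1, (if size0 < 0 then 0 else size0))
          (si, inner.1, if inner.2 = 0 then st.2.2 ++ [si] else st.2.2))
        (n, s, hits)).2.2 := by
  induction splits generalizing n hits s with
  | nil => simp [PySem.List.enumerate_nil]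
  | cons p splits ih =>
    rw [PySem.List.enumerate_cons]
    simp only [List.foldl_cons]
    have hsz : (0 : Int) ≤ (if size0 < 0 then 0 else size0) := by split <;> omega
    have hfresh : ∀ j : Nat, getElem? s j ≠ some (n + 1) := by
      intro j hc
      have := hinv j (n + 1) hc
      omega
    have hA : (PySem.Set.issubset (PySem.Set.ofList (PySem.List.pyRange lo (lo + size0) 1))
          (PySem.Set.ofList p.2) = true)
        ↔ ((p.2.foldl (innerStep lo (if size0 < 0 then 0 else size0) (n + 1))
            (s, (if size0 < 0 then 0 else size0))).2 = 0) := by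
      rw [PySem.Set.issubset_iff,
        round_zero_iff lo (if size0 < 0 then 0 else size0) (n + 1) p.2 s hsz hlen hfresh]
      constructor
      · intro h x hx
        have hx2 : lo ≤ x ∧ x < lo + size0 := by
          rcases hx with ⟨h1, h2⟩
          by_cases hneg : size0 < 0
          · rw [if_pos hneg] at h2; omega
          · rw [if_neg hneg] at h2; omega
        have : x ∈ PySem.Set.ofList p.2 := by
          apply h
          rw [PySem.Set.mem_ofList, PySem.List.mem_pyRange_one]
          omega
        simpa [PySem.Set.mem_ofList] using this
      · intro h x hx
        rw [PySem.Set.mem_ofList, PySem.List.mem_pyRange_one] at hx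
        rw [PySem.Set.mem_ofList]
        apply h
        by_cases hneg : size0 < 0
        · rw [if_pos hneg]; omega
        · rw [if_neg hneg]; omega
    rw [if_congr hA rfl rfl]
    have hlen' : (p.2.foldl (innerStep lo (if size0 < 0 then 0 else size0) (n + 1))
        (s, (if size0 < 0 then 0 else size0))).1.length
        = (if size0 < 0 then 0 else size0).toNat := by
      rw [inner_length]; exact hlen
    have hinv' : ∀ (j : Nat) (w : Int),
        getElem? (p.2.foldl (innerStep lo (if size0 < 0 then 0 else size0) (n + 1))
          (s, (if size0 < 0 then 0 else size0))).1 j = some w → w ≤ n + 1 := by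
      intro j w hc
      rw [inner_get lo (if size0 < 0 then 0 else size0) (n + 1) p.2 s _ hlen j] at hc
      by_cases hcond : (lo + (j : Int)) ∈ p.2 ∧ (j : Int) < (if size0 < 0 then 0 else size0)
      · rw [if_pos hcond] at hc
        have := Option.some.inj hc; omega
      · rw [if_neg hcond] at hc
        have := hinv j w hc; omega
    exact ih (n + 1) _ _ hlen' hinv'

-- ===== VERDICT (by name: the statement is the Claim_ definition above) =====
theorem window_in_test_splits_spec : Claim_equal_window_in_test_splits := by
  intro time_index n_days splits _
  unfold Spec_window_in_test_splits window_in_test_splits window_in_test_splits_alt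
  have h := outer_eq time_index (n_days * 24) splits 0 []
    (List.replicate (if n_days * 24 < 0 then 0 else n_days * 24).toNat 0)
    (by simp) ?_
  · exact h
  · intro j w hc
    rw [List.getElem?_replicate] at hc
    by_cases hjj : j < (if n_days * 24 < 0 then 0 else n_days * 24).toNat
    · rw [if_pos hjj] at hc; injection hc with hw; omega
    · rw [if_neg hjj] at hc; exact absurd hc (by simp)
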